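-- pv_equiv track=rewrite | github.com/opensourcex123/LeetCode | demo96 找到消失的数字.py | findDisappearNumbers
-- ===== SOURCE A (Python) =====
-- def findDisappearNumbers(nums):
--     res=[]
--     n=len(nums)
--     hash=set(nums)
--     for i in range(1,n+1):
--         if i not in hash:
--             res.append(i)
--     return res
-- ===== SOURCE B (Python) =====
-- def findDisappearNumbers(nums):
--     arr = sorted(nums)
--     m = len(arr)
--     res = []
--     j = 0
--     for expected in range(1, m + 1):
--         while j < m and arr[j] < expected:
--             j += 1
--         if j < m and arr[j] == expected:
--             while j < m and arr[j] == expected: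
--                 j += 1
--         else:
--             res.append(expected)
--     return res
-- ===== Notes on version B (the rewrite author's own statement) =====
-- stated objective: alternative
-- what changed: Sort-then-merge: B sorts nums once and sweeps a single pointer through the sorted copy in step with expected = 1..n, skipping duplicates, instead of building a hash set and doing n membership tests.
import Mathlib
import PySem

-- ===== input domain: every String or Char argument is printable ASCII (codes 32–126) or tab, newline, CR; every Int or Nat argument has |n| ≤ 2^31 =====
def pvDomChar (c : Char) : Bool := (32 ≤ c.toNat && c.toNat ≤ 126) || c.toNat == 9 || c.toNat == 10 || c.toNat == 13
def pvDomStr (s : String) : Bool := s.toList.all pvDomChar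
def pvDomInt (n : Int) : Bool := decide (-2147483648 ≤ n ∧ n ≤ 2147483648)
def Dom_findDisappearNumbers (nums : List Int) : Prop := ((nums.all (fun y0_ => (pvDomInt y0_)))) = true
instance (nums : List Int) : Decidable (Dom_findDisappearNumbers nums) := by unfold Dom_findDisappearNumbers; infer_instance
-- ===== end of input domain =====

-- B sorts nums once and sweeps one pointer through the sorted copy in step with expected = 1..n (sort-then-merge) instead of A's hash-set membership tests.


-- ===== PORT A =====
def findDisappearNumbers (nums : List Int) : List Int :=
  let n : Int := nums.length
  let hash := PySem.Set.ofList nums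
  (PySem.List.pyRange 1 (n + 1) 1).foldl
    (fun res i => if PySem.Set.contains hash i then res else res ++ [i]) []

-- ===== PORT B =====
-- helper: 'while j < m and p(arr[j]): j += 1' (both inner while loops of Source B)
def pvSkip (arr : List Int) (m : Nat) (p : Int → Bool) (j : Nat) : Nat :=
  if _h : j < m then
    if p (arr.getD j 0) then pvSkip arr m p (j + 1) else j
  else j
termination_by m - j

-- one iteration of Source B's for-loop body, state = (pointer j, result so far)
def pvStep (arr : List Int) (m : Nat) (st : Nat × List Int) (e : Int) : Nat × List Int :=
  let j1 := pvSkip arr m (fun x => decide (x < e)) st.1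
  if j1 < m ∧ arr.getD j1 0 = e then
    (pvSkip arr m (fun x => decide (x = e)) j1, st.2)
  else
    (j1, st.2 ++ [e])

def findDisappearNumbers_alt (nums : List Int) : List Int :=
  let arr := PySem.List.sorted nums (fun x => x) false
  let m := arr.length
  ((PySem.List.pyRange 1 ((m : Int) + 1) 1).foldl (pvStep arr m) (0, [])).2

-- ===== PRECONDITION & SPEC =====
def Spec_findDisappearNumbers (nums : List Int) (out : List Int) : Prop := out = findDisappearNumbers_alt nums
instance (nums : List Int) (out : List Int) : Decidable (Spec_findDisappearNumbers nums out) := by unfold Spec_findDisappearNumbers; infer_instance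

-- ===== CLAIM =====
def Claim_equal_findDisappearNumbers : Prop := ∀ (nums : List Int), Dom_findDisappearNumbers nums → Spec_findDisappearNumbers nums (findDisappearNumbers nums)

-- ===== LEMMAS AND PROOFS =====

theorem pvSkip_eq_step (arr : List Int) (m : Nat) (p : Int → Bool) (j : Nat)
    (hm : j < m) (hp : p (arr.getD j 0) = true) :
    pvSkip arr m p j = pvSkip arr m p (j + 1) := by
  rw [pvSkip]; rw [List.getD_eq_getElem?_getD] at hp; simp [hm, hp]

theorem pvSkip_eq_self (arr : List Int) (m : Nat) (p : Int → Bool) (j : Nat)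
    (h : ¬ j < m ∨ p (arr.getD j 0) = false) :
    pvSkip arr m p j = j := by
  rw [pvSkip]
  rcases h with h | h
  · simp [h]
  · rw [List.getD_eq_getElem?_getD] at h
    by_cases hm : j < m <;> simp [hm, h]

theorem pvSkip_ge (arr : List Int) (m : Nat) (p : Int → Bool) (j : Nat) :
    j ≤ pvSkip arr m p j := by
  by_cases hm : j < m
  · by_cases hp : p (arr.getD j 0) = true
    · rw [pvSkip_eq_step arr m p j hm hp]
      exact le_trans (Nat.le_succ j) (pvSkip_ge arr m p (j + 1))
    · rw [pvSkip_eq_self arr m p j (Or.inr (by simpa using hp))]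
  · rw [pvSkip_eq_self arr m p j (Or.inl hm)]
termination_by m - j
decreasing_by omega

theorem pvSkip_le (arr : List Int) (m : Nat) (p : Int → Bool) (j : Nat) (h : j ≤ m) :
    pvSkip arr m p j ≤ m := by
  by_cases hm : j < m
  · by_cases hp : p (arr.getD j 0) = true
    · rw [pvSkip_eq_step arr m p j hm hp]
      exact pvSkip_le arr m p (j + 1) (by omega)
    · rw [pvSkip_eq_self arr m p j (Or.inr (by simpa using hp))]; exact h
  · rw [pvSkip_eq_self arr m p j (Or.inl hm)]; exact h
termination_by m - j
decreasing_by omega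

theorem pvSkip_mid (arr : List Int) (m : Nat) (p : Int → Bool) (j idx : Nat)
    (h1 : j ≤ idx) (h2 : idx < pvSkip arr m p j) : p (arr.getD idx 0) = true := by
  by_cases hm : j < m
  · by_cases hp : p (arr.getD j 0) = true
    · rw [pvSkip_eq_step arr m p j hm hp] at h2
      rcases Nat.eq_or_lt_of_le h1 with he | hl
      · exact he ▸ hp
      · exact pvSkip_mid arr m p (j + 1) idx hl h2
    · rw [pvSkip_eq_self arr m p j (Or.inr (by simpa using hp))] at h2; omega
  · rw [pvSkip_eq_self arr m p j (Or.inl hm)] at h2; omega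
termination_by m - j
decreasing_by omega

theorem pvSkip_stop (arr : List Int) (m : Nat) (p : Int → Bool) (j : Nat)
    (h : pvSkip arr m p j < m) : p (arr.getD (pvSkip arr m p j) 0) = false := by
  by_cases hm : j < m
  · by_cases hp : p (arr.getD j 0) = true
    · rw [pvSkip_eq_step arr m p j hm hp] at h ⊢
      exact pvSkip_stop arr m p (j + 1) h
    · rw [pvSkip_eq_self arr m p j (Or.inr (by simpa using hp))]
      simpa using hp
  · rw [pvSkip_eq_self arr m p j (Or.inl hm)] at h; omega
termination_by m - j
decreasing_by omega

-- main loop invariant: the pointer sweep over the sorted copy agrees with A's membership tests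
theorem pvLoop (nums arr : List Int)
    (harr : arr = PySem.List.sorted nums (fun x => x) false)
    (e : Int) (j : Nat) (res : List Int)
    (hj : j ≤ nums.length)
    (hinv : ∀ idx : Nat, idx < j → arr.getD idx 0 < e) :
    ((PySem.List.pyRange e ((nums.length : Int) + 1) 1).foldl
        (pvStep arr nums.length) (j, res)).2
      = (PySem.List.pyRange e ((nums.length : Int) + 1) 1).foldl
          (fun r i => if PySem.Set.contains (PySem.Set.ofList nums) i then r else r ++ [i]) res := by
  subst harr
  have hlen : (PySem.List.sorted nums (fun x => x) false).length = nums.length :=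
    PySem.List.length_sorted ..
  by_cases hend : (nums.length : Int) + 1 ≤ e
  · rw [PySem.List.pyRange_one_eq_nil hend]; simp
  · push Not at hend
    rw [PySem.List.pyRange_one_cons (by omega)]
    simp only [List.foldl_cons]
    set arr := PySem.List.sorted nums (fun x => x) false with harr
    set j1 := pvSkip arr nums.length (fun x => decide (x < e)) j with hj1
    have hjj1 : j ≤ j1 := pvSkip_ge ..
    have hj1m : j1 ≤ nums.length := pvSkip_le _ _ _ _ hj
    have hbelow : ∀ idx : Nat, idx < j1 → arr.getD idx 0 < e := by
      intro idx hi
      by_cases h : idx < j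
      · exact hinv idx h
      · have := pvSkip_mid arr nums.length (fun x => decide (x < e)) j idx (by omega) hi
        simpa using this
    have hmemch : (j1 < nums.length ∧ arr.getD j1 0 = e) ↔ e ∈ nums := by
      constructor
      · rintro ⟨h1, h2⟩
        have hmem : arr.getD j1 0 ∈ arr := by
          rw [List.getD_eq_getElem arr 0 (by omega)]
          exact List.getElem_mem _
        rw [h2] at hmem
        exact (PySem.List.mem_sorted _ _ _ _).mp hmem
      · intro hm
        have hm' : e ∈ arr := (PySem.List.mem_sorted _ _ _ _).mpr hm
        obtain ⟨idx, hidx, heq⟩ := List.mem_iff_getElem.mp hm'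
        have hidxge : j1 ≤ idx := by
          by_contra h
          push Not at h
          have := hbelow idx h
          rw [List.getD_eq_getElem arr 0 hidx, heq] at this
          omega
        have hj1lt : j1 < nums.length := by omega
        have hge : ¬ arr.getD j1 0 < e := by
          have := pvSkip_stop arr nums.length (fun x => decide (x < e)) j hj1lt
          rw [← hj1] at this
          simpa using this
        have hmono : arr[j1]'(by omega) ≤ arr[idx]'hidx :=
          PySem.List.sorted_id_getElem_mono (xs := nums) (p := j1) (q := idx) hidxge hidx
        rw [List.getD_eq_getElem arr 0 (by omega)]
        rw [List.getD_eq_getElem arr 0 (by omega)] at hge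
        omega
    have hcont : PySem.Set.contains (PySem.Set.ofList nums) e = decide (e ∈ nums) := by
      by_cases h : e ∈ nums <;> simp [PySem.Set.contains, PySem.Set.mem_ofList, h]
    have hstep : pvStep arr nums.length (j, res) e
        = if j1 < nums.length ∧ arr.getD j1 0 = e then
            (pvSkip arr nums.length (fun x => decide (x = e)) j1, res)
          else (j1, res ++ [e]) := by
      simp only [pvStep, ← hj1]
    rw [hstep]
    by_cases hpres : j1 < nums.length ∧ arr.getD j1 0 = e
    · rw [if_pos hpres, hcont, decide_eq_true (hmemch.mp hpres), if_pos rfl]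
      set j2 := pvSkip arr nums.length (fun x => decide (x = e)) j1 with hj2
      have hj2m : j2 ≤ nums.length := pvSkip_le _ _ _ _ hj1m
      refine pvLoop nums arr harr (e + 1) j2 res hj2m ?_
      intro idx hi
      by_cases h : idx < j1
      · have := hbelow idx h; omega
      · have := pvSkip_mid arr nums.length (fun x => decide (x = e)) j1 idx (by omega)
          (by rw [hj2] at hi; exact hi)
        simp only [decide_eq_true_eq] at this
        omega
    · rw [if_neg hpres, hcont]
      have hne : e ∉ nums := fun h => hpres (hmemch.mpr h)
      rw [decide_eq_false hne, if_neg (by simp)]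
      refine pvLoop nums arr harr (e + 1) j1 (res ++ [e]) hj1m ?_
      intro idx hi
      have := hbelow idx hi
      omega
termination_by ((nums.length : Int) + 1 - e).toNat
decreasing_by all_goals omega

-- ===== VERDICT =====
theorem findDisappearNumbers_spec : Claim_equal_findDisappearNumbers := by
  intro nums _
  show findDisappearNumbers nums = findDisappearNumbers_alt nums
  simp only [findDisappearNumbers, findDisappearNumbers_alt, PySem.List.length_sorted]
  exact (pvLoop nums _ rfl 1 0 [] (Nat.zero_le _) (by omega)).symm
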